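-- pv_equiv track=rewrite | github.com/Turnipnator/Nags | src/analyst.py | _count_wins_in_last_5
-- ===== SOURCE A (Python) =====
-- def _count_wins_in_last_5(form: str) -> int:
--     """Count '1' (wins) among the most recent 5 completed runs of a form
--     string. Letters like F/U/P/B/R are skipped (not completed runs); '0'
--     means 10th or worse and is not a win."""
--     if not form:
--         return 0
--     completed = [c for c in form if c in "0123456789"]
--     if not completed:
--         return 0
--     last_5 = completed[-5:]
--     return sum(1 for c in last_5 if c == "1")
-- ===== SOURCE B (Python) =====
-- def _count_wins_in_last_5(form: str) -> int:
--     """Backward single pass with running counters and early stop: scan from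
--     the most recent end, count digits seen and wins, break after 5 digits."""
--     digits_seen = 0
--     wins = 0
--     for c in reversed(form):
--         if '0' <= c <= '9':
--             digits_seen += 1
--             if c == '1':
--                 wins += 1
--             if digits_seen == 5:
--                 break
--     return wins
-- ===== Notes on version B (the rewrite author's own statement) =====
-- stated objective: alternative
-- what changed: Replaces A's build-filtered-list, slice last 5, then resum pipeline by a single backward scan with two running counters (digits_seen, wins) and an early break after the fifth digit, allocating no intermediate lists.
import Mathlib
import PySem

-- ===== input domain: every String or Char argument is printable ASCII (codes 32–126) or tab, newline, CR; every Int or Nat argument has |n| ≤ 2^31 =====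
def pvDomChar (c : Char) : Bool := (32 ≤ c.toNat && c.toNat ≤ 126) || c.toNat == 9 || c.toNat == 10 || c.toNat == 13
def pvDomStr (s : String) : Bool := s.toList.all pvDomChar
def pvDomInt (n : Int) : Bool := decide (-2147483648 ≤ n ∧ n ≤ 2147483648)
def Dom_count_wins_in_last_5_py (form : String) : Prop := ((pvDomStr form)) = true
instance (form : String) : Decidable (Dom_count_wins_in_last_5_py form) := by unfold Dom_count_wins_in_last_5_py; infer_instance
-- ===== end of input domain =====

-- B replaces A's build-filter-slice-resum pipeline by a single backward scan with
-- two running counters and an early stop after the fifth digit (alternative decomposition).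

-- ===== PORT A =====
def count_wins_in_last_5_py (form : String) : Int :=
  if form = "" then 0
  else
    let completed := form.toList.filter (fun c => "0123456789".toList.contains c)
    if completed = [] then 0
    else
      let last_5 := PySem.List.slice completed (some (-5)) none
      last_5.foldl (fun acc c => if c == '1' then acc + 1 else acc) 0

-- ===== PORT B =====
-- backward scan: digits_seen / wins counters, break when digits_seen reaches 5
def pvGoB : List Char → Int → Int → Int
  | [], _, wins => wins
  | c :: rest, seen, wins =>
    if '0' ≤ c ∧ c ≤ '9' then
      let seen' := seen + 1
      let wins' := if c == '1' then wins + 1 else wins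
      if seen' = 5 then wins' else pvGoB rest seen' wins'
    else pvGoB rest seen wins

def count_wins_in_last_5_py_alt (form : String) : Int :=
  pvGoB form.toList.reverse 0 0

-- ===== PRECONDITION & SPEC =====
def Spec_count_wins_in_last_5_py (form : String) (out : Int) : Prop := out = count_wins_in_last_5_py_alt form
instance (form : String) (out : Int) : Decidable (Spec_count_wins_in_last_5_py form out) := by unfold Spec_count_wins_in_last_5_py; infer_instance

-- ===== CLAIM (what is proved, stated in full; the proofs are below) =====
def Claim_equal_count_wins_in_last_5_py : Prop := ∀ (form : String), Dom_count_wins_in_last_5_py form → Spec_count_wins_in_last_5_py form (count_wins_in_last_5_py form)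

-- ===== LEMMAS AND PROOFS =====

-- A's membership digit test and B's range digit test agree
lemma pv_digit_test (c : Char) :
    ("0123456789".toList.contains c) = decide ('0' ≤ c ∧ c ≤ '9') := by
  have hle : ∀ a b : Char, (a ≤ b) ↔ a.toNat ≤ b.toNat := fun a b => by
    rw [Char.le_def, UInt32.le_iff_toNat_le]; rfl
  have heq : ∀ a b : Char, (a = b) ↔ a.toNat = b.toNat := fun a b => by
    constructor
    · intro h; rw [h]
    · intro h; exact Char.ext (UInt32.toNat_inj.mp h)
  have hl : "0123456789".toList = ['0','1','2','3','4','5','6','7','8','9'] := by decide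
  rw [hl]
  simp only [List.contains_eq_mem, List.mem_cons, List.not_mem_nil, or_false]
  rw [decide_eq_decide]
  simp only [heq, hle]
  simp only [show ('0':Char).toNat = 48 from by decide, show ('1':Char).toNat = 49 from by decide,
    show ('2':Char).toNat = 50 from by decide, show ('3':Char).toNat = 51 from by decide,
    show ('4':Char).toNat = 52 from by decide, show ('5':Char).toNat = 53 from by decide,
    show ('6':Char).toNat = 54 from by decide, show ('7':Char).toNat = 55 from by decide,
    show ('8':Char).toNat = 56 from by decide, show ('9':Char).toNat = 57 from by decide]
  omega

-- loop invariant for B's backward scan: it adds the wins among the next (5 - seen) digits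
lemma pvGoB_eq (r : List Char) : ∀ (seen wins : Int), 0 ≤ seen → seen < 5 →
    pvGoB r seen wins
      = wins + (((r.filter (fun c => decide ('0' ≤ c ∧ c ≤ '9'))).take (5 - seen).toNat).count '1' : Int) := by
  induction r with
  | nil => intro seen wins _ _; simp [pvGoB]
  | cons c rest ih =>
    intro seen wins h0 h5
    by_cases hd : '0' ≤ c ∧ c ≤ '9'
    · have hfl : (c :: rest).filter (fun x => decide ('0' ≤ x ∧ x ≤ '9'))
          = c :: rest.filter (fun x => decide ('0' ≤ x ∧ x ≤ '9')) := by
        simp [hd]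
      have htn : (5 - seen).toNat = (4 - seen).toNat + 1 := by omega
      rw [hfl, htn]
      simp only [pvGoB, hd, List.take_succ_cons, List.count_cons]
      by_cases h45 : seen + 1 = 5
      · have : (4 - seen).toNat = 0 := by omega
        simp only [h45, if_true, this, List.take_zero, List.count_nil]
        by_cases h1 : c = '1' <;> simp [h1]
      · have hlt : seen + 1 < 5 := by
          rcases lt_or_eq_of_le (Int.add_one_le_iff.mpr h5) with h | h
          · exact h
          · exact absurd h h45
        have h40 : (5 - (seen + 1)).toNat = (4 - seen).toNat := by omega
        rw [if_neg h45, ih (seen + 1) _ (by omega) hlt, h40]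
        by_cases h1 : c = '1' <;> simp [h1] <;> ring
    · rw [List.filter_cons_of_neg (by simpa using hd)]
      simp only [pvGoB]
      rw [if_neg hd]
      exact ih seen wins h0 h5

-- ===== VERDICT (by name: the statement is the Claim_ definition above) =====
theorem count_wins_in_last_5_py_spec : Claim_equal_count_wins_in_last_5_py := by
  unfold Claim_equal_count_wins_in_last_5_py
  intro form _
  unfold Spec_count_wins_in_last_5_py count_wins_in_last_5_py count_wins_in_last_5_py_alt
  have hfilter : form.toList.filter (fun c => "0123456789".toList.contains c)
      = form.toList.filter (fun c => decide ('0' ≤ c ∧ c ≤ '9')) := by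
    apply List.filter_congr; intro c _; exact pv_digit_test c
  set ds := form.toList.filter (fun c => decide ('0' ≤ c ∧ c ≤ '9')) with hds
  have hB : pvGoB form.toList.reverse 0 0 = ((ds.drop (ds.length - 5)).count '1' : Int) := by
    rw [pvGoB_eq _ 0 0 (by omega) (by omega), List.filter_reverse]
    have h5 : ((5:Int) - 0).toNat = 5 := by decide
    rw [h5, ← hds, List.take_reverse, List.count_reverse]
    norm_num
  rw [hB]
  by_cases hE : form = ""
  · rw [if_pos hE]
    have hnil : form.toList = [] := by rw [hE]; rfl
    simp [hds, hnil]
  · rw [if_neg hE]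
    simp only [hfilter]
    by_cases h2 : ds = []
    · simp [h2]
    · rw [if_neg h2]
      rw [PySem.List.slice_from_neg_ofNat ds 5 (by omega)]
      rw [PySem.List.foldl_beq_add_one]
      omega
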